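-- pv_equiv track=rewrite | github.com/willxie/hmm-vs-memm | src/memm_temp.py | buildLastFeature
-- ===== SOURCE A (Python) =====
-- def buildLastFeature(max_num_features, C, map_index_symbol, map_index_POS):
-- 	last_feature_list = {}
--
-- 	for i in range(len(map_index_POS)):
-- 		for j in range(len(map_index_symbol)):
-- 			word = map_index_symbol[j]
-- 			tag = map_index_POS[i]
-- 			total = 0
-- 			for l in range(max_num_features):
-- 				total += feature(l, word, tag)
-- 			last_feature_list[(word, tag)]	= C - total
--
-- 	return last_feature_list
--
-- def feature(num_features, word, state, last_feature_list = {}, word_tag_tuple = ()):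
-- 	word = word.upper()
--
-- 	# Done by inspection of the first file in Brown
-- 	if num_features == 0:
-- 		return 1 if state == "NNS" and word.endswith("S") else 0
-- 	elif num_features == 1:
-- 		return 1 if state == "VBD" and word.endswith("ED") else 0
-- 	elif num_features == 2:
-- 		return 1 if state == "VBG" and word.endswith("ING") else 0
-- 	elif num_features == 3:
-- 		return 1 if state == "TO" and word == "TO" else 0
-- 	elif num_features == 4:
-- 		return 1 if state == "DT" and word == "THE" else 0
-- 	else:
-- 		temp_tuple = (word, state)
-- 		if temp_tuple == word_tag_tuple:
-- 			return last_feature_list[(word, state)] # This should error if last_feature_list is not passed in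
-- 		else:
-- 			return 0
-- 	'''
-- 	featureList =
-- 	# Nouns
-- 	featureIndicator["NNS"] = {
-- 		0: word.endswith("s")
-- 	}
-- 	# Verbs
-- 	featureIndicator["VBG"] = {
-- 		0: word.endswith("ing"),
-- 		1: word.endswith("ed")
-- 	}
-- 	featureIndicator["VBN"] = {
-- 		0: word.endswith("ing"),
-- 		1: word.endswith("ed")
-- 	}
-- 	featureIndicator["NNP"] = {
-- 		0: word.endswith("ing"),
-- 		1: word.endswith("ed"),
-- 		2: word == "JURY"
-- 	}
-- 	'''
-- ===== SOURCE B (Python) =====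
-- def buildLastFeature(max_num_features, C, map_index_symbol, map_index_POS):
--     # Full-fill pass: every (word, tag) pair gets C.
--     last_feature_list = {}
--     for tag in map_index_POS:
--         for word in map_index_symbol:
--             last_feature_list[(word, tag)] = C
--     # Sparse patch pass: each active rule lowers its own tag's matching words to C - 1.
--     rules = [
--         (0, "NNS", lambda w: w.endswith("S")),
--         (1, "VBD", lambda w: w.endswith("ED")),
--         (2, "VBG", lambda w: w.endswith("ING")),
--         (3, "TO",  lambda w: w == "TO"),
--         (4, "DT",  lambda w: w == "THE"),
--     ]
--     pos_set = set(map_index_POS)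
--     for idx, tag, cond in rules:
--         if idx < max_num_features and tag in pos_set:
--             for word in map_index_symbol:
--                 if cond(word.upper()):
--                     last_feature_list[(word, tag)] = C - 1
--     return last_feature_list
-- ===== Notes on version B (the rewrite author's own statement) =====
-- stated objective: faster
-- what changed: Replaces A's per-(word,tag) summation over range(max_num_features) with a full-fill pass assigning C to every pair followed by a sparse patch pass that, for each active rule, overwrites only the rule's own tag's matching words with C-1.
import Mathlib
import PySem

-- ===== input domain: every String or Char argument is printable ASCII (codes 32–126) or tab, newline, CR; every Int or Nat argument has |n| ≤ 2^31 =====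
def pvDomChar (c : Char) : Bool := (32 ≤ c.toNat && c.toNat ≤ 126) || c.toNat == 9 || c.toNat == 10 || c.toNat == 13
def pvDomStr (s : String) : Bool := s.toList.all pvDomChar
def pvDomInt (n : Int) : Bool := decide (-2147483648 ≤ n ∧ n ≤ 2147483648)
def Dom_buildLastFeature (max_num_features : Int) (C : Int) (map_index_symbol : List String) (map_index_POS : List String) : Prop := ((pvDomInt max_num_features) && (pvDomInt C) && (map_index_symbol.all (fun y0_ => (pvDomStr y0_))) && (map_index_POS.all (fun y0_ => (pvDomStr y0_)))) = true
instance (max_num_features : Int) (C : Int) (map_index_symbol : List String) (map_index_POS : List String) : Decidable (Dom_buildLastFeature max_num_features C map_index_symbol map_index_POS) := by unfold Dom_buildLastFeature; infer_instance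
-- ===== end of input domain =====

-- B replaces A's per-(word,tag) summation over range(max_num_features) by a full-fill pass
-- (every pair gets C) plus a sparse per-rule patch pass (matching words get C - 1).


-- ===== PORT A =====
-- feature(l, word, state) with the default last_feature_list/word_tag_tuple arguments:
-- the final else branch always returns 0 (a (word, state) tuple never equals ()).
def pyFeature (num_features : Int) (word state : String) : Int :=
  let w := PySem.Str.upper word
  if num_features = 0 then (if state = "NNS" ∧ PySem.Str.endswith w "S" = true then 1 else 0)
  else if num_features = 1 then (if state = "VBD" ∧ PySem.Str.endswith w "ED" = true then 1 else 0)
  else if num_features = 2 then (if state = "VBG" ∧ PySem.Str.endswith w "ING" = true then 1 else 0)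
  else if num_features = 3 then (if state = "TO" ∧ w = "TO" then 1 else 0)
  else if num_features = 4 then (if state = "DT" ∧ w = "THE" then 1 else 0)
  else 0

def buildLastFeature (max_num_features : Int) (C : Int) (map_index_symbol : List String) (map_index_POS : List String) : List (String × String × Int) :=
  let d : PySem.Dict (String × String) Int :=
    (PySem.List.pyRange 0 (map_index_POS.length : Int) 1).foldl (fun d i =>
      (PySem.List.pyRange 0 (map_index_symbol.length : Int) 1).foldl (fun d j =>
        let word := PySem.List.pyGetD map_index_symbol j ""
        let tag := PySem.List.pyGetD map_index_POS i ""
        let total := (PySem.List.pyRange 0 max_num_features 1).foldl (fun t l => t + pyFeature l word tag) 0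
        d.insert (word, tag) (C - total)) d) PySem.Dict.empty
  d.items.map (fun p => (p.1.1, p.1.2, p.2))

-- ===== PORT B =====
def bRules : List (Int × String × (String → Bool)) :=
  [(0, "NNS", fun w => PySem.Str.endswith w "S"),
   (1, "VBD", fun w => PySem.Str.endswith w "ED"),
   (2, "VBG", fun w => PySem.Str.endswith w "ING"),
   (3, "TO",  fun w => w == "TO"),
   (4, "DT",  fun w => w == "THE")]

def buildLastFeature_alt (max_num_features : Int) (C : Int) (map_index_symbol : List String) (map_index_POS : List String) : List (String × String × Int) :=
  let fill : PySem.Dict (String × String) Int :=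
    map_index_POS.foldl (fun d tag =>
      map_index_symbol.foldl (fun d word => d.insert (word, tag) C) d) PySem.Dict.empty
  let posSet : PySem.Set String := PySem.Set.ofList map_index_POS
  let d := bRules.foldl (fun d r =>
    if r.1 < max_num_features ∧ PySem.Set.contains posSet r.2.1 = true then
      map_index_symbol.foldl (fun d word =>
        if r.2.2 (PySem.Str.upper word) = true then d.insert (word, r.2.1) (C - 1) else d) d
    else d) fill
  d.items.map (fun p => (p.1.1, p.1.2, p.2))

-- ===== PRECONDITION & SPEC =====
def Spec_buildLastFeature (max_num_features : Int) (C : Int) (map_index_symbol : List String) (map_index_POS : List String) (out : List (String × String × Int)) : Prop := out = buildLastFeature_alt max_num_features C map_index_symbol map_index_POS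
instance (max_num_features : Int) (C : Int) (map_index_symbol : List String) (map_index_POS : List String) (out : List (String × String × Int)) : Decidable (Spec_buildLastFeature max_num_features C map_index_symbol map_index_POS out) := by unfold Spec_buildLastFeature; infer_instance

-- ===== CLAIM (what is proved, stated in full; the proofs are below) =====
def Claim_equal_buildLastFeature : Prop := ∀ (max_num_features : Int) (C : Int) (map_index_symbol : List String) (map_index_POS : List String), Dom_buildLastFeature max_num_features C map_index_symbol map_index_POS → Spec_buildLastFeature max_num_features C map_index_symbol map_index_POS (buildLastFeature max_num_features C map_index_symbol map_index_POS)

-- ===== LEMMAS AND PROOFS =====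

-- closed form of A's inner feature sum
def featTot (m : Int) (word state : String) : Int :=
  (if 0 < m ∧ state = "NNS" ∧ PySem.Str.endswith (PySem.Str.upper word) "S" = true then 1 else 0) +
  (if 1 < m ∧ state = "VBD" ∧ PySem.Str.endswith (PySem.Str.upper word) "ED" = true then 1 else 0) +
  (if 2 < m ∧ state = "VBG" ∧ PySem.Str.endswith (PySem.Str.upper word) "ING" = true then 1 else 0) +
  (if 3 < m ∧ state = "TO" ∧ PySem.Str.upper word = "TO" then 1 else 0) +
  (if 4 < m ∧ state = "DT" ∧ PySem.Str.upper word = "THE" then 1 else 0)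

theorem pyFeature_ge_five (l : Int) (hl : 5 ≤ l) (word state : String) :
    pyFeature l word state = 0 := by
  simp [pyFeature, show l ≠ 0 by omega, show l ≠ 1 by omega, show l ≠ 2 by omega,
        show l ≠ 3 by omega, show l ≠ 4 by omega]

theorem sum_pyFeature (m : Int) (word state : String) :
    (PySem.List.pyRange 0 m 1).foldl (fun t l => t + pyFeature l word state) 0 = featTot m word state := by
  rw [PySem.List.foldl_add]
  by_cases h0 : m ≤ 0
  · rw [PySem.List.pyRange_one_eq_nil h0]
    simp [featTot, show ¬(0 < m) by omega, show ¬(1 < m) by omega, show ¬(2 < m) by omega,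
          show ¬(3 < m) by omega, show ¬(4 < m) by omega]
  · by_cases h5 : 5 ≤ m
    · rw [PySem.List.pyRange_one_append 0 5 m (by omega) h5]
      rw [show PySem.List.pyRange 0 5 1 = [0, 1, 2, 3, 4] from by decide]
      rw [List.map_append, List.sum_append]
      have hz : ((PySem.List.pyRange 5 m 1).map (fun l => pyFeature l word state)).sum = 0 := by
        apply List.sum_eq_zero
        intro x hx
        obtain ⟨l, hl, rfl⟩ := List.mem_map.mp hx
        exact pyFeature_ge_five l (PySem.List.mem_pyRange_one.mp hl).1 _ _
      rw [hz]
      simp only [List.map_cons, List.map_nil, List.sum_cons, List.sum_nil]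
      simp only [pyFeature, featTot]
      norm_num [show (0:Int) < m from by omega, show (1:Int) < m from by omega,
        show (2:Int) < m from by omega, show (3:Int) < m from by omega,
        show (4:Int) < m from by omega]
      try ring
    · have h14 : m = 1 ∨ m = 2 ∨ m = 3 ∨ m = 4 := by omega
      rcases h14 with rfl | rfl | rfl | rfl
      · rw [show PySem.List.pyRange 0 1 1 = [0] from by decide]
        simp only [List.map_cons, List.map_nil, List.sum_cons, List.sum_nil]
        simp only [pyFeature, featTot]; norm_num; try ring
      · rw [show PySem.List.pyRange 0 2 1 = [0, 1] from by decide]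
        simp only [List.map_cons, List.map_nil, List.sum_cons, List.sum_nil]
        simp only [pyFeature, featTot]; norm_num; try ring
      · rw [show PySem.List.pyRange 0 3 1 = [0, 1, 2] from by decide]
        simp only [List.map_cons, List.map_nil, List.sum_cons, List.sum_nil]
        simp only [pyFeature, featTot]; norm_num; try ring
      · rw [show PySem.List.pyRange 0 4 1 = [0, 1, 2, 3] from by decide]
        simp only [List.map_cons, List.map_nil, List.sum_cons, List.sum_nil]
        simp only [pyFeature, featTot]; norm_num; try ring

-- getD of the nested pair fold whose value is a function of the key
theorem getD_rowFold (G : String → String → Int) (syms : List String) (t : String)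
    (d : PySem.Dict (String × String) Int) (k : String × String) :
    (syms.foldl (fun d w => d.insert (w, t) (G w t)) d).getD k 0 =
      if k.1 ∈ syms ∧ k.2 = t then G k.1 k.2 else d.getD k 0 := by
  induction syms generalizing d with
  | nil => simp
  | cons w ws ih =>
    simp only [List.foldl_cons]
    rw [ih]
    by_cases h1 : k.1 ∈ ws ∧ k.2 = t
    · rw [if_pos h1, if_pos ⟨List.mem_cons_of_mem _ h1.1, h1.2⟩]
    · rw [if_neg h1, PySem.Dict.getD_insert]
      by_cases h2 : k = (w, t)
      · rw [if_pos h2, if_pos (by rw [h2]; exact ⟨List.mem_cons_self, rfl⟩), h2]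
      · rw [if_neg h2, if_neg ?_]
        rintro ⟨hm, ht⟩
        rcases List.mem_cons.mp hm with h | h
        · exact h2 (by rcases k with ⟨a, b⟩; simp_all)
        · exact h1 ⟨h, ht⟩

theorem getD_pairFold (G : String → String → Int) (POSs syms : List String)
    (d : PySem.Dict (String × String) Int) (k : String × String) :
    (POSs.foldl (fun d t => syms.foldl (fun d w => d.insert (w, t) (G w t)) d) d).getD k 0 =
      if k.1 ∈ syms ∧ k.2 ∈ POSs then G k.1 k.2 else d.getD k 0 := by
  induction POSs generalizing d with
  | nil => simp
  | cons t ts ih =>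
    simp only [List.foldl_cons]
    rw [ih, getD_rowFold]
    by_cases h1 : k.1 ∈ syms ∧ k.2 ∈ ts
    · rw [if_pos h1, if_pos ⟨h1.1, List.mem_cons_of_mem _ h1.2⟩]
    · rw [if_neg h1]
      by_cases h2 : k.1 ∈ syms ∧ k.2 = t
      · rw [if_pos h2, if_pos ⟨h2.1, by rw [h2.2]; exact List.mem_cons_self⟩]
      · rw [if_neg h2, if_neg ?_]
        rintro ⟨hs, hm⟩
        rcases List.mem_cons.mp hm with h | h
        · exact h2 ⟨hs, h⟩
        · exact h1 ⟨hs, h⟩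

theorem keys_rowFold (G : String → String → Int) (syms : List String) (t : String)
    (d : PySem.Dict (String × String) Int) :
    (syms.foldl (fun d w => d.insert (w, t) (G w t)) d).keys =
      PySem.Set.update d.keys (syms.map (fun w => (w, t))) :=
  PySem.Dict.keys_foldl_insert_key syms (fun w => (w, t)) (fun _ w => G w t) d

theorem keys_pairFold (G : String → String → Int) (POSs syms : List String)
    (d : PySem.Dict (String × String) Int) :
    (POSs.foldl (fun d t => syms.foldl (fun d w => d.insert (w, t) (G w t)) d) d).keys =
      PySem.Set.update d.keys (POSs.flatMap (fun t => syms.map (fun w => (w, t)))) := by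
  induction POSs generalizing d with
  | nil => simp [PySem.Set.update_nil]
  | cons t ts ih =>
    simp only [List.foldl_cons, List.flatMap_cons]
    rw [ih, keys_rowFold, PySem.Set.update_append]

theorem nodup_keys_pairFold (G : String → String → Int) (POSs syms : List String)
    (d : PySem.Dict (String × String) Int) (h : d.keys.Nodup) :
    (POSs.foldl (fun d t => syms.foldl (fun d w => d.insert (w, t) (G w t)) d) d).keys.Nodup := by
  induction POSs generalizing d with
  | nil => exact h
  | cons t ts ih =>
    simp only [List.foldl_cons]
    exact ih _ (PySem.Dict.nodup_keys_foldl_insert_key syms (fun w => (w, t)) (fun _ w => G w t) d h)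

-- one patch row: conditional overwrite of the (·, t0) keys along syms
theorem getD_patchRow (p : String → Bool) (c : Int) (syms : List String) (t0 : String)
    (d : PySem.Dict (String × String) Int) (k : String × String) :
    (syms.foldl (fun d w => if p (PySem.Str.upper w) = true then d.insert (w, t0) c else d) d).getD k 0 =
      if k.1 ∈ syms ∧ k.2 = t0 ∧ p (PySem.Str.upper k.1) = true then c else d.getD k 0 := by
  induction syms generalizing d with
  | nil => simp
  | cons w ws ih =>
    simp only [List.foldl_cons]
    rw [ih]
    by_cases h1 : k.1 ∈ ws ∧ k.2 = t0 ∧ p (PySem.Str.upper k.1) = true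
    · rw [if_pos h1, if_pos ⟨List.mem_cons_of_mem _ h1.1, h1.2⟩]
    · rw [if_neg h1]
      by_cases hp : p (PySem.Str.upper w) = true
      · rw [if_pos hp, PySem.Dict.getD_insert]
        by_cases h2 : k = (w, t0)
        · rw [if_pos h2, if_pos ⟨by rw [h2]; exact List.mem_cons_self, by rw [h2], by rw [h2]; exact hp⟩]
        · rw [if_neg h2, if_neg ?_]
          rintro ⟨hm, ht, hpp⟩
          rcases List.mem_cons.mp hm with h | h
          · exact h2 (by rcases k with ⟨a, b⟩; simp_all)
          · exact h1 ⟨h, ht, hpp⟩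
      · rw [if_neg hp, if_neg ?_]
        rintro ⟨hm, ht, hpp⟩
        rcases List.mem_cons.mp hm with h | h
        · rw [h] at hpp; exact hp hpp
        · exact h1 ⟨h, ht, hpp⟩

theorem keys_patchRow (p : String → Bool) (c : Int) (syms : List String) (t0 : String)
    (d : PySem.Dict (String × String) Int)
    (h : ∀ w ∈ syms, d.contains (w, t0) = true) :
    (syms.foldl (fun d w => if p (PySem.Str.upper w) = true then d.insert (w, t0) c else d) d).keys = d.keys := by
  induction syms generalizing d with
  | nil => rfl
  | cons w ws ih =>
    simp only [List.foldl_cons]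
    have hw := h w List.mem_cons_self
    by_cases hp : p (PySem.Str.upper w) = true
    · rw [if_pos hp]
      have hkeys := PySem.Dict.keys_insert_of_contains d c hw
      have hcont : ∀ w' ∈ ws, (d.insert (w, t0) c).contains (w', t0) = true := by
        intro w' hw'
        rw [PySem.Dict.contains_eq_decide_mem_keys, hkeys, ← PySem.Dict.contains_eq_decide_mem_keys]
        exact h w' (List.mem_cons_of_mem _ hw')
      rw [ih _ hcont, hkeys]
    · rw [if_neg hp]
      exact ih d (fun w' hw' => h w' (List.mem_cons_of_mem _ hw'))

-- the whole patch pass, generically over an arbitrary rule list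
theorem getD_rulesFold (M c : Int) (ps : PySem.Set String) (syms : List String)
    (rs : List (Int × String × (String → Bool)))
    (d : PySem.Dict (String × String) Int) (k : String × String) :
    (rs.foldl (fun d r =>
        if r.1 < M ∧ PySem.Set.contains ps r.2.1 = true then
          syms.foldl (fun d w => if r.2.2 (PySem.Str.upper w) = true then d.insert (w, r.2.1) c else d) d
        else d) d).getD k 0 =
      if (∃ r ∈ rs, r.1 < M ∧ PySem.Set.contains ps r.2.1 = true ∧ k.2 = r.2.1 ∧ k.1 ∈ syms ∧ r.2.2 (PySem.Str.upper k.1) = true)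
      then c else d.getD k 0 := by
  induction rs generalizing d with
  | nil => simp
  | cons r rs ih =>
    simp only [List.foldl_cons]
    rw [ih]
    by_cases hrest : ∃ r' ∈ rs, r'.1 < M ∧ PySem.Set.contains ps r'.2.1 = true ∧ k.2 = r'.2.1 ∧ k.1 ∈ syms ∧ r'.2.2 (PySem.Str.upper k.1) = true
    · obtain ⟨r', hr', hP⟩ := hrest
      rw [if_pos ⟨r', hr', hP⟩, if_pos ⟨r', List.mem_cons_of_mem _ hr', hP⟩]
    · rw [if_neg hrest]
      by_cases hc : r.1 < M ∧ PySem.Set.contains ps r.2.1 = true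
      · rw [if_pos hc, getD_patchRow r.2.2 c syms r.2.1]
        by_cases h2 : k.1 ∈ syms ∧ k.2 = r.2.1 ∧ r.2.2 (PySem.Str.upper k.1) = true
        · rw [if_pos h2, if_pos ⟨r, List.mem_cons_self, hc.1, hc.2, h2.2.1, h2.1, h2.2.2⟩]
        · rw [if_neg h2, if_neg ?_]
          rintro ⟨r', hr', h1', h2', h3', h4', h5'⟩
          rcases List.mem_cons.mp hr' with h | h
          · subst h; exact h2 ⟨h4', h3', h5'⟩
          · exact hrest ⟨r', h, h1', h2', h3', h4', h5'⟩
      · rw [if_neg hc, if_neg ?_]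
        rintro ⟨r', hr', h1', h2', h3', h4', h5'⟩
        rcases List.mem_cons.mp hr' with h | h
        · subst h; exact hc ⟨h1', h2'⟩
        · exact hrest ⟨r', h, h1', h2', h3', h4', h5'⟩

theorem keys_rulesFold (M c : Int) (ps : PySem.Set String) (syms : List String)
    (rs : List (Int × String × (String → Bool)))
    (d : PySem.Dict (String × String) Int)
    (h : ∀ r ∈ rs, PySem.Set.contains ps r.2.1 = true → ∀ w ∈ syms, (w, r.2.1) ∈ d.keys) :
    (rs.foldl (fun d r =>
        if r.1 < M ∧ PySem.Set.contains ps r.2.1 = true then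
          syms.foldl (fun d w => if r.2.2 (PySem.Str.upper w) = true then d.insert (w, r.2.1) c else d) d
        else d) d).keys = d.keys := by
  induction rs generalizing d with
  | nil => rfl
  | cons r rs ih =>
    simp only [List.foldl_cons]
    by_cases hc : r.1 < M ∧ PySem.Set.contains ps r.2.1 = true
    · rw [if_pos hc]
      have hrow : (syms.foldl (fun d w => if r.2.2 (PySem.Str.upper w) = true then d.insert (w, r.2.1) c else d) d).keys = d.keys := by
        apply keys_patchRow
        intro w hw
        rw [PySem.Dict.contains_eq_decide_mem_keys]
        exact decide_eq_true (h r List.mem_cons_self hc.2 w hw)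
      rw [ih _ ?_, hrow]
      intro r' hr' hc' w hw
      rw [hrow]
      exact h r' (List.mem_cons_of_mem _ hr') hc' w hw
    · rw [if_neg hc]
      exact ih d (fun r' hr' hc' w hw => h r' (List.mem_cons_of_mem _ hr') hc' w hw)

-- the two dictionaries coincide
theorem dicts_eq (m C : Int) (syms POSs : List String) :
    (POSs.foldl (fun d tag => syms.foldl (fun d w => d.insert (w, tag) (C - featTot m w tag)) d)
      (PySem.Dict.empty : PySem.Dict (String × String) Int))
    = bRules.foldl (fun d r =>
        if r.1 < m ∧ PySem.Set.contains (PySem.Set.ofList POSs) r.2.1 = true then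
          syms.foldl (fun d w => if r.2.2 (PySem.Str.upper w) = true then d.insert (w, r.2.1) (C - 1) else d) d
        else d)
        (POSs.foldl (fun d tag => syms.foldl (fun d w => d.insert (w, tag) C) d) PySem.Dict.empty) := by
  have hkA : (POSs.foldl (fun d tag => syms.foldl (fun d w => d.insert (w, tag) (C - featTot m w tag)) d)
      (PySem.Dict.empty : PySem.Dict (String × String) Int)).keys
      = PySem.Set.ofList (POSs.flatMap (fun t => syms.map (fun w => (w, t)))) := by
    rw [keys_pairFold (fun w t => C - featTot m w t)]
    simp [PySem.Set.update_nil_left]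
  have hkF : (POSs.foldl (fun d tag => syms.foldl (fun d w => d.insert (w, tag) C) d)
      (PySem.Dict.empty : PySem.Dict (String × String) Int)).keys
      = PySem.Set.ofList (POSs.flatMap (fun t => syms.map (fun w => (w, t)))) := by
    rw [keys_pairFold (fun _ _ => C)]
    simp [PySem.Set.update_nil_left]
  have hnA : (POSs.foldl (fun d tag => syms.foldl (fun d w => d.insert (w, tag) (C - featTot m w tag)) d)
      (PySem.Dict.empty : PySem.Dict (String × String) Int)).keys.Nodup :=
    nodup_keys_pairFold (fun w t => C - featTot m w t) POSs syms _ (by simp)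
  have hkB : (bRules.foldl (fun d r =>
        if r.1 < m ∧ PySem.Set.contains (PySem.Set.ofList POSs) r.2.1 = true then
          syms.foldl (fun d w => if r.2.2 (PySem.Str.upper w) = true then d.insert (w, r.2.1) (C - 1) else d) d
        else d)
        (POSs.foldl (fun d tag => syms.foldl (fun d w => d.insert (w, tag) C) d) PySem.Dict.empty)).keys
      = PySem.Set.ofList (POSs.flatMap (fun t => syms.map (fun w => (w, t)))) := by
    rw [keys_rulesFold, hkF]
    intro r _ hc w hw
    rw [hkF]
    apply (PySem.Set.mem_ofList _ _).mpr
    exact List.mem_flatMap.mpr ⟨r.2.1,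
      (PySem.Set.mem_ofList _ _).mp ((PySem.Set.contains_iff _ _).mp hc),
      List.mem_map.mpr ⟨w, hw, rfl⟩⟩
  have hnB : (bRules.foldl (fun d r =>
        if r.1 < m ∧ PySem.Set.contains (PySem.Set.ofList POSs) r.2.1 = true then
          syms.foldl (fun d w => if r.2.2 (PySem.Str.upper w) = true then d.insert (w, r.2.1) (C - 1) else d) d
        else d)
        (POSs.foldl (fun d tag => syms.foldl (fun d w => d.insert (w, tag) C) d) PySem.Dict.empty)).keys.Nodup := by
    rw [hkB]; exact PySem.Set.nodup_ofList _
  apply PySem.Dict.ext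
  rw [PySem.Dict.items_eq_map_keys _ hnA 0, PySem.Dict.items_eq_map_keys _ hnB 0, hkA, hkB]
  apply List.map_congr_left
  intro k hk
  obtain ⟨t, htP, hkm⟩ := List.mem_flatMap.mp ((PySem.Set.mem_ofList _ _).mp hk)
  obtain ⟨w, hws, rfl⟩ := List.mem_map.mp hkm
  simp only [Prod.mk.injEq, true_and]
  rw [getD_pairFold, getD_rulesFold, getD_pairFold]
  simp only []
  rw [if_pos (⟨hws, htP⟩ : w ∈ syms ∧ t ∈ POSs), if_pos (⟨hws, htP⟩ : w ∈ syms ∧ t ∈ POSs)]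
  by_cases hH : ∃ r ∈ bRules, r.1 < m ∧ PySem.Set.contains (PySem.Set.ofList POSs) r.2.1 = true ∧
      t = r.2.1 ∧ w ∈ syms ∧ r.2.2 (PySem.Str.upper w) = true
  · rw [if_pos hH]
    obtain ⟨r, hr, h1, h2, h3, h4, h5⟩ := hH
    simp only [bRules, List.mem_cons, List.not_mem_nil, or_false] at hr
    rcases hr with rfl | rfl | rfl | rfl | rfl <;> simp only [] at h1 h3 h5 <;> subst h3
    · simp at h5
      simp [featTot, h1, h5]
    · simp at h5
      simp [featTot, h1, h5]
    · simp at h5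
      simp [featTot, h1, h5]
    · simp at h5
      simp [featTot, h1, h5]
    · simp at h5
      simp [featTot, h1, h5]
  · rw [if_neg hH]
    have n0 : ¬(0 < m ∧ t = "NNS" ∧ PySem.Str.endswith (PySem.Str.upper w) "S" = true) := by
      rintro ⟨hh1, hh2, hh3⟩
      exact hH ⟨(0, "NNS", fun w => PySem.Str.endswith w "S"), by simp [bRules], hh1,
        (PySem.Set.contains_iff _ _).mpr ((PySem.Set.mem_ofList _ _).mpr (hh2 ▸ htP)), hh2, hws, hh3⟩
    have n1 : ¬(1 < m ∧ t = "VBD" ∧ PySem.Str.endswith (PySem.Str.upper w) "ED" = true) := by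
      rintro ⟨hh1, hh2, hh3⟩
      exact hH ⟨(1, "VBD", fun w => PySem.Str.endswith w "ED"), by simp [bRules], hh1,
        (PySem.Set.contains_iff _ _).mpr ((PySem.Set.mem_ofList _ _).mpr (hh2 ▸ htP)), hh2, hws, hh3⟩
    have n2 : ¬(2 < m ∧ t = "VBG" ∧ PySem.Str.endswith (PySem.Str.upper w) "ING" = true) := by
      rintro ⟨hh1, hh2, hh3⟩
      exact hH ⟨(2, "VBG", fun w => PySem.Str.endswith w "ING"), by simp [bRules], hh1,
        (PySem.Set.contains_iff _ _).mpr ((PySem.Set.mem_ofList _ _).mpr (hh2 ▸ htP)), hh2, hws, hh3⟩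
    have n3 : ¬(3 < m ∧ t = "TO" ∧ PySem.Str.upper w = "TO") := by
      rintro ⟨hh1, hh2, hh3⟩
      exact hH ⟨(3, "TO", fun w => w == "TO"), by simp [bRules], hh1,
        (PySem.Set.contains_iff _ _).mpr ((PySem.Set.mem_ofList _ _).mpr (hh2 ▸ htP)), hh2, hws, beq_iff_eq.mpr hh3⟩
    have n4 : ¬(4 < m ∧ t = "DT" ∧ PySem.Str.upper w = "THE") := by
      rintro ⟨hh1, hh2, hh3⟩
      exact hH ⟨(4, "DT", fun w => w == "THE"), by simp [bRules], hh1,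
        (PySem.Set.contains_iff _ _).mpr ((PySem.Set.mem_ofList _ _).mpr (hh2 ▸ htP)), hh2, hws, beq_iff_eq.mpr hh3⟩
    simp only [featTot]
    rw [if_neg n0, if_neg n1, if_neg n2, if_neg n3, if_neg n4]
    ring

-- ===== VERDICT (by name: the statement is the Claim_ definition above) =====
theorem buildLastFeature_spec : Claim_equal_buildLastFeature := by
  intro m C syms POSs _
  unfold Spec_buildLastFeature buildLastFeature buildLastFeature_alt
  simp only [sum_pyFeature]
  have hinner : ∀ (tag : String) (d : PySem.Dict (String × String) Int),
      List.foldl (fun d j => d.insert (PySem.List.pyGetD syms j "", tag)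
          (C - featTot m (PySem.List.pyGetD syms j "") tag)) d
        (PySem.List.pyRange 0 (syms.length : Int) 1)
      = List.foldl (fun d w => d.insert (w, tag) (C - featTot m w tag)) d syms := by
    intro tag d
    exact PySem.List.foldl_pyRange_zero_pyGetD' syms ""
      (fun d w => d.insert (w, tag) (C - featTot m w tag)) d
  simp only [hinner]
  rw [PySem.List.foldl_pyRange_zero_pyGetD' POSs ""
    (fun d tag => List.foldl (fun d w => d.insert (w, tag) (C - featTot m w tag)) d syms)
    PySem.Dict.empty]
  exact congrArg (fun d => d.items.map (fun p => (p.1.1, p.1.2, p.2))) (dicts_eq m C syms POSs)
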